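-- pv_equiv track=rewrite | github.com/meynis/Performance-Lab-Tasks | task1/task1.py | circular_array_path
-- ===== SOURCE A (Python) =====
-- def circular_array_path(n, m):
--     """
--     Находит путь в круговом массиве
--     n - размер массива (1 до n)
--     m - длина интервала
--     """
--     path = []
--     current = 0
--
--     while True:
--         path.append(current + 1)
--         current = (current + m) % n
--
--         if current == 0:
--             break
--
--     return path
-- ===== SOURCE B (Python) =====
-- def circular_array_path(n, m):
--     # gcd-based closed form: the cycle length is |n| // gcd(n, m),
--     # and the k-th visited index is (k*m) % n.
--     a, b = abs(n), abs(m)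
--     while b:
--         a, b = b, a % b
--     length = abs(n) // a
--     return [(i * m) % n + 1 for i in range(length)]
-- ===== Notes on version B (the rewrite author's own statement) =====
-- stated objective: simpler
-- what changed: Replaced the incremental step-until-back-to-zero loop with the closed form: cycle length |n|//gcd(n,m) computed by a small Euclid loop, then the path built directly as [(i*m)%n+1 for i in range(length)].
import Mathlib
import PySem

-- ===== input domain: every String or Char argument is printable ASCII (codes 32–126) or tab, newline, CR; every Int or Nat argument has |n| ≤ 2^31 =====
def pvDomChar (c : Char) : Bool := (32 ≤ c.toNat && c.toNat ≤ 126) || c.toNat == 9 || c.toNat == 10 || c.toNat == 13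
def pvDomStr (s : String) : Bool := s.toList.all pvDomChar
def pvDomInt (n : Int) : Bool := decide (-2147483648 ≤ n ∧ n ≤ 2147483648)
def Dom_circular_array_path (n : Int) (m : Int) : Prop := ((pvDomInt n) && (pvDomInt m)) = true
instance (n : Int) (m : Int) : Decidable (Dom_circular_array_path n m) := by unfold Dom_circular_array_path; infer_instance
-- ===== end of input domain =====

-- B replaces A's step-until-back-to-zero loop by a gcd-based cycle length and a closed-form comprehension.


-- ===== PORT A =====
-- A's `while True` loop, with fuel n.natAbs: for n ≠ 0 the loop stops after at most
-- |n| appends (proved below), so the fuel is never exhausted on inputs in Pre_.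
def pathLoopA (n m : Int) : Nat → Int → List Int → List Int
  | 0, _, path => path
  | fuel + 1, current, path =>
    let path := path ++ [current + 1]
    let current := PySem.Int.mod (current + m) n
    if current = 0 then path else pathLoopA n m fuel current path

def circular_array_path (n : Int) (m : Int) : List Int :=
  pathLoopA n m n.natAbs 0 []

-- ===== PORT B =====
-- Source B's hand-written Euclid loop:  while b: a, b = b, a % b
def euclidB : Nat → Nat → Nat
  | a, 0 => a
  | a, b + 1 => euclidB (b + 1) (a % (b + 1))
termination_by _ b => b
decreasing_by exact Nat.mod_lt _ (Nat.succ_pos b)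

def circular_array_path_alt (n : Int) (m : Int) : List Int :=
  let g := euclidB n.natAbs m.natAbs
  let length := n.natAbs / g
  (List.range length).map (fun (i : Nat) => PySem.Int.mod ((i : Int) * m) n + 1)

-- ===== PRECONDITION & SPEC =====
-- Pre_ excludes exactly n = 0, where Python A raises ZeroDivisionError on the first `% n`.
def Pre_circular_array_path (n : Int) (m : Int) : Prop := n ≠ 0
instance (n : Int) (m : Int) : Decidable (Pre_circular_array_path n m) := by unfold Pre_circular_array_path; infer_instance
def pvWitness_circular_array_path : Int × Int := (5, 2)

def Spec_circular_array_path (n : Int) (m : Int) (out : List Int) : Prop := out = circular_array_path_alt n m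
instance (n : Int) (m : Int) (out : List Int) : Decidable (Spec_circular_array_path n m out) := by unfold Spec_circular_array_path; infer_instance

-- ===== CLAIM (what is proved, stated in full; the proofs are below) =====
def Claim_equal_circular_array_path : Prop := ∀ (n : Int) (m : Int), Dom_circular_array_path n m → Pre_circular_array_path n m → Spec_circular_array_path n m (circular_array_path n m)
-- ===== LEMMAS AND PROOFS =====

theorem euclidB_eq_gcd (a b : Nat) : euclidB a b = Nat.gcd a b := by
  fun_induction euclidB with
  | case1 a => simp
  | case2 a b ih =>
      rw [ih, Nat.gcd_comm, ← Nat.gcd_rec, Nat.gcd_comm]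

-- divisibility characterisation: n ∣ k*m ↔ (|n|/gcd) ∣ k
theorem nat_dvd_mul_iff (N M k : Nat) (hN : N ≠ 0) :
    N ∣ k * M ↔ N / Nat.gcd N M ∣ k := by
  set g := Nat.gcd N M with hg
  have hgpos : 0 < g := Nat.gcd_pos_of_pos_left M (Nat.pos_of_ne_zero hN)
  have hNg : N / g * g = N := Nat.div_mul_cancel (Nat.gcd_dvd_left N M)
  have hMg : M / g * g = M := Nat.div_mul_cancel (Nat.gcd_dvd_right N M)
  constructor
  · intro h
    have h2 : N / g * g ∣ k * (M / g) * g := by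
      rw [hNg, mul_assoc, hMg]
      exact h
    have h3 : N / g ∣ k * (M / g) :=
      (Nat.mul_dvd_mul_iff_right hgpos).mp h2
    exact (Nat.Coprime.dvd_of_dvd_mul_right
      (Nat.coprime_div_gcd_div_gcd hgpos) h3)
  · intro h
    calc N = N / g * g := hNg.symm
    _ ∣ k * g := Nat.mul_dvd_mul_right h g
    _ ∣ k * M := Nat.mul_dvd_mul_left k (hg ▸ Nat.gcd_dvd_right N M)

theorem int_dvd_iff (n m : Int) (k : Nat) (hn : n ≠ 0) :
    n ∣ (k : Int) * m ↔ (n.natAbs / Nat.gcd n.natAbs m.natAbs ∣ k) := by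
  rw [← Int.natAbs_dvd_natAbs, Int.natAbs_mul, Int.natAbs_natCast]
  exact nat_dvd_mul_iff n.natAbs m.natAbs k (by simpa using hn)

-- the loop, entered with current = (j*m) % n, produces the closed-form tail
theorem pathLoopA_closed (n m : Int) (hn : n ≠ 0)
    (L : Nat) (hL : L = n.natAbs / Nat.gcd n.natAbs m.natAbs) :
    ∀ (f j : Nat) (acc : List Int), j < L → L - j ≤ f →
      pathLoopA n m f (PySem.Int.mod ((j : Int) * m) n) acc =
        acc ++ (List.range' j (L - j)).map (fun (i : Nat) => PySem.Int.mod ((i : Int) * m) n + 1) := by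
  intro f
  induction f with
  | zero => intro j acc hj hf; omega
  | succ f ih =>
    intro j acc hj hf
    have hstep : PySem.Int.mod (PySem.Int.mod ((j : Int) * m) n + m) n
        = PySem.Int.mod (((j + 1 : Nat) : Int) * m) n := by
      show (((j : Int) * m).fmod n + m).fmod n = ((((j + 1 : Nat) : Int)) * m).fmod n
      rw [Int.fmod_add_fmod]
      congr 1
      push_cast
      ring
    have hgoal : pathLoopA n m (f + 1) (PySem.Int.mod ((j : Int) * m) n) acc
        = if PySem.Int.mod (((j + 1 : Nat) : Int) * m) n = 0
          then acc ++ [PySem.Int.mod ((j : Int) * m) n + 1]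
          else pathLoopA n m f (PySem.Int.mod (((j + 1 : Nat) : Int) * m) n)
                 (acc ++ [PySem.Int.mod ((j : Int) * m) n + 1]) := by
      rw [pathLoopA, hstep]
    by_cases hz : PySem.Int.mod (((j + 1 : Nat) : Int) * m) n = 0
    · -- back at 0: n ∣ (j+1)*m, so L ∣ j+1, so j+1 = L
      have hdvd : n ∣ ((j + 1 : Nat) : Int) * m := (PySem.Int.mod_eq_zero_iff_dvd _ _).mp hz
      have hLd : n.natAbs / Nat.gcd n.natAbs m.natAbs ∣ j + 1 := (int_dvd_iff n m (j + 1) hn).mp hdvd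
      have hjL : j + 1 = L := by
        rw [← hL] at hLd
        have := Nat.le_of_dvd (Nat.succ_pos j) hLd
        omega
      have hrange : L - j = 1 := by omega
      rw [hgoal, if_pos hz, hrange, List.range'_one, List.map_cons, List.map_nil]
    · -- not yet 0: j+1 < L, recurse
      have hne : ¬ (n.natAbs / Nat.gcd n.natAbs m.natAbs ∣ j + 1) := by
        intro hd
        exact hz ((PySem.Int.mod_eq_zero_iff_dvd _ _).mpr ((int_dvd_iff n m (j + 1) hn).mpr hd))
      have hjL : j + 1 < L := by
        rcases Nat.lt_or_ge (j + 1) L with h | h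
        · exact h
        · exfalso
          have hEq : j + 1 = L := by omega
          exact hne (by rw [hEq, hL])
      rw [hgoal, if_neg hz,
          ih (j + 1) (acc ++ [PySem.Int.mod ((j : Int) * m) n + 1]) hjL (by omega)]
      have hrange : L - j = (L - (j + 1)) + 1 := by omega
      rw [hrange, List.range'_succ, List.map_cons, List.append_assoc]
      rfl

theorem circular_array_path_spec : Claim_equal_circular_array_path := by
  intro n m _ hn
  unfold Spec_circular_array_path circular_array_path circular_array_path_alt
  rw [euclidB_eq_gcd]
  set g := Nat.gcd n.natAbs m.natAbs with hg
  set L := n.natAbs / g with hL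
  have hN : n.natAbs ≠ 0 := by simpa using hn
  have hgpos : 0 < g := Nat.gcd_pos_of_pos_left m.natAbs (Nat.pos_of_ne_zero hN)
  have hLpos : 0 < L := Nat.div_pos (Nat.le_of_dvd (Nat.pos_of_ne_zero hN) (Nat.gcd_dvd_left _ _)) hgpos
  have hLle : L ≤ n.natAbs := Nat.div_le_self _ _
  have h0 : (0 : Int) = PySem.Int.mod (((0 : Nat) : Int) * m) n := by
    simp [PySem.Int.mod]
  rw [h0, pathLoopA_closed n m hn L (by rw [hL, hg]) n.natAbs 0 [] hLpos (by omega)]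
  simp [List.range_eq_range']
  rw [← hL]
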